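-- pv_equiv track=rewrite | github.com/nowChae/algorithm | 프로그래머스/2/60058. 괄호 변환/괄호 변환.py | solution
-- ===== SOURCE A (Python) =====
-- def solution(p):
--     if good(p):
--         return p
--     u, v = divide_uv(p)
--     if good(u):
--         return u + solution(v)
--     else:
--         return '(' + solution(v) + ')' + change(u[1:-1])
--     return p
--
-- def divide_uv(p):
--     open_cnt = 0
--     close_cnt = 0
--
--     cnt = 0
--     for q in p:
--         if (open_cnt != 0) and (open_cnt == close_cnt):
--             return [p[:cnt], p[cnt:]]
--         if q == '(':
--             open_cnt += 1
--             cnt += 1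
--         else:
--             close_cnt += 1
--             cnt += 1
--     return [p[:cnt], p[cnt:]]
--
-- def good(u):
--     stack = []
--     for ui in u:
--         if ui == '(':
--             stack.append(ui)
--         else:
--             if len(stack) == 0:
--                 return False
--             else:
--                 stack.pop()
--     return True
--
-- def change(u):
--     result = ''
--     for char in u:
--         if char == '(':
--             result += ')'
--         else:
--             result += '('
--     return result
-- ===== SOURCE B (Python) =====
-- def solution(p):
--     # precompute prefix balances and suffix-minima once; then peel balanced
--     # chunks left-to-right with prefix/suffix accumulators instead of recursion.
--     n = len(p)
--     bal = [0] * (n + 1)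
--     for i, c in enumerate(p):
--         bal[i + 1] = bal[i] + (1 if c == '(' else -1)
--     good_suf = [False] * (n + 1)
--     minsuf = bal[n]
--     for i in range(n, -1, -1):
--         minsuf = min(minsuf, bal[i])
--         good_suf[i] = (minsuf >= bal[i])
--     pre = []
--     post = []
--     i = 0
--     while not good_suf[i]:
--         j = i + 1
--         m = bal[j]
--         while j < n and bal[j] != bal[i]:
--             j += 1
--             m = min(m, bal[j])
--         if m >= bal[i]:
--             pre.append(p[i:j])
--         else:
--             pre.append('(')
--             post.append(')' + ''.join(')' if c == '(' else '(' for c in p[i + 1:j - 1]))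
--         i = j
--     pre.append(p[i:])
--     post.reverse()
--     return ''.join(pre) + ''.join(post)
-- ===== Notes on version B (the rewrite author's own statement) =====
-- stated objective: alternative
-- what changed: A's recursive divide-and-check (good() re-scans each remaining suffix and chunk) is replaced by one precomputation of prefix balances and suffix minima plus a single left-to-right chunk loop with prefix/suffix accumulators.
import Mathlib
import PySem

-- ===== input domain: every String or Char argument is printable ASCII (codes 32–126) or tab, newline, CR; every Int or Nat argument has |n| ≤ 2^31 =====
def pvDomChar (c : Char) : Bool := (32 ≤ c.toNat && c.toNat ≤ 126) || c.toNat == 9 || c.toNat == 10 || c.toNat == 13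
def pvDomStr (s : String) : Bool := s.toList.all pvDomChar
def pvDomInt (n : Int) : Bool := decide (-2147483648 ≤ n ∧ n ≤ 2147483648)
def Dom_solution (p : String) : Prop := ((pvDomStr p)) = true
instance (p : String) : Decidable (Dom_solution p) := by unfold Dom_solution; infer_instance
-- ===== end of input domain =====

-- B replaces A's recursive divide-and-check (which re-scans each remaining suffix with good())
-- by one precomputation of prefix balances and suffix minima plus a single left-to-right
-- chunk loop with prefix/suffix accumulators (an alternative, non-recursive algorithm).

-- ===== PORT A =====
-- good(u): stack loop
def goodLoop (stack : List Char) : List Char → Bool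
  | [] => true
  | c :: rest =>
    if c = '(' then goodLoop ('(' :: stack) rest
    else
      match stack with
      | [] => false
      | _ :: s => goodLoop s rest

def goodA (u : List Char) : Bool := goodLoop [] u

-- divide_uv's for-loop (acc holds the consumed prefix reversed; the final return
-- [p[:cnt], p[cnt:]] with cnt = len(p) is (acc.reverse, []))
def divLoop (oc cc : Int) (acc : List Char) : List Char → List Char × List Char
  | [] => (acc.reverse, [])
  | c :: r =>
    if oc ≠ 0 ∧ oc = cc then (acc.reverse, c :: r)
    else if c = '(' then divLoop (oc + 1) cc (c :: acc) r
    else divLoop oc (cc + 1) (c :: acc) r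

def divideUV (p : List Char) : List Char × List Char := divLoop 0 0 [] p

def changeA (u : List Char) : List Char :=
  u.foldl (fun r c => r ++ [if c = '(' then ')' else '(']) []

theorem divLoop_snd_le (rest : List Char) : ∀ (oc cc : Int) (acc : List Char),
    ((divLoop oc cc acc rest).2).length ≤ rest.length := by
  induction rest with
  | nil => intro oc cc acc; simp [divLoop]
  | cons c r ih =>
    intro oc cc acc
    simp only [divLoop]
    split
    · simp
    · split
      · exact le_trans (ih _ _ _) (by simp)
      · exact le_trans (ih _ _ _) (by simp)

theorem divide_snd_lt (c : Char) (cs : List Char) :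
    ((divideUV (c :: cs)).2).length < (c :: cs).length := by
  have h : divideUV (c :: cs)
      = if c = '(' then divLoop 1 0 [c] cs else divLoop 0 1 [c] cs := by
    simp [divideUV, divLoop]
  rw [h]
  split
  · exact lt_of_le_of_lt (divLoop_snd_le _ _ _ _) (by simp)
  · exact lt_of_le_of_lt (divLoop_snd_le _ _ _ _) (by simp)

def solA (u : List Char) : List Char :=
  if goodA u then u
  else
    let uv := divideUV u
    if goodA uv.1 then uv.1 ++ solA uv.2
    -- u[1:-1] for a python string is exactly "drop the first and the last char"
    else '(' :: solA uv.2 ++ ')' :: changeA ((uv.1.drop 1).dropLast)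
termination_by u.length
decreasing_by
  all_goals
    (cases u with
     | nil => simp [goodA, goodLoop] at *
     | cons c cs => exact divide_snd_lt c cs)

def solution (p : String) : String := String.ofList (solA p.toList)

-- ===== PORT B =====
-- bal[i] prefix balances, as the list [bal[i], …, bal[n]] starting from balance b
def balList (b : Int) : List Char → List Int
  | [] => [b]
  | c :: rest => b :: balList (b + (if c = '(' then 1 else -1)) rest

-- the reverse loop computing minsuf and good_suf ( = (good_suf flags, minsuf))
def sufScan : List Int → List Bool × Int
  | [] => ([], 0)            -- unreachable: bal is never empty
  | [b] => ([decide (b ≥ b)], b)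
  | b :: x :: rest =>
    let r := sufScan (x :: rest)
    let m := min b r.2
    ((decide (m ≥ b)) :: r.1, m)

-- the inner while loop: walk from j = i+1 until j = n or bal[j] = bal[i],
-- accumulating the chunk p[i:j] (in acc, reversed) and m = min(bal[i+1..j])
def findChunk (bi : Int) (acc : List Char) (m : Int) :
    List Char → List Int → List Char × List Char × List Int × Int
  | [], bals => (acc.reverse, [], bals, m)
  | c :: cs, bj :: bn :: bs =>
    if bj = bi then (acc.reverse, c :: cs, bj :: bn :: bs, m)
    else findChunk bi (c :: acc) (min m bn) cs (bn :: bs)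
  | c :: cs, bals => (acc.reverse, c :: cs, bals, m)   -- unreachable: bal list is one longer

theorem findChunk_rest_le (cs : List Char) : ∀ (bals : List Int) (bi : Int) (acc : List Char) (m : Int),
    ((findChunk bi acc m cs bals).2.1).length ≤ cs.length := by
  induction cs with
  | nil => intro bals bi acc m; simp [findChunk]
  | cons c r ih =>
    intro bals bi acc m
    match bals with
    | [] => simp [findChunk]
    | [b] => simp [findChunk]
    | bj :: bn :: bs =>
      simp only [findChunk]
      split
      · simp
      · exact le_trans (ih _ _ _ _) (by simp)

-- the outer while loop; pre/post are the python accumulator lists, flattened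
def loopB (pre post : List Char) : List Char → List Int → List Bool → List Char
  | prest, bals, g :: gs =>
    if g then pre ++ prest ++ post
    else
      match prest, bals with
      | c :: cs, bi :: b1 :: bs =>
        let fc := findChunk bi [c] b1 cs (b1 :: bs)
        let chunk := fc.1
        let gsRest := gs.drop (chunk.length - 1)
        if fc.2.2.2 ≥ bi then loopB (pre ++ chunk) post fc.2.1 fc.2.2.1 gsRest
        else
          loopB (pre ++ ['('])
            (')' :: ((chunk.drop 1).dropLast.map (fun c => if c = '(' then ')' else '(')) ++ post)
            fc.2.1 fc.2.2.1 gsRest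
      | prest, _ => pre ++ prest ++ post   -- unreachable shapes
  | prest, _, [] => pre ++ prest ++ post   -- unreachable: good_suf is never empty
termination_by prest _ _ => prest.length
decreasing_by
  all_goals exact lt_of_le_of_lt (findChunk_rest_le _ _ _ _ _) (by simp)

def solution_alt (p : String) : String :=
  let pl := p.toList
  let bals := balList 0 pl
  let gs := (sufScan bals).1
  String.ofList (loopB [] [] pl bals gs)

-- ===== PRECONDITION & SPEC =====
def Spec_solution (p : String) (out : String) : Prop := out = solution_alt p
instance (p : String) (out : String) : Decidable (Spec_solution p out) := by unfold Spec_solution; infer_instance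

-- ===== CLAIM (what is proved, stated in full; the proofs are below) =====
def Claim_equal_solution : Prop := ∀ (p : String), Dom_solution p → Spec_solution p (solution p)

-- ===== LEMMAS AND PROOFS =====
def pvDelta (c : Char) : Int := if c = '(' then 1 else -1

def minPref : List Char → Int
  | [] => 0
  | c :: r => min 0 (pvDelta c + minPref r)

def balOf : List Char → Int
  | [] => 0
  | c :: r => pvDelta c + balOf r

def jspec (b : Int) : List Char → Nat
  | [] => 0
  | c :: r => if b = 0 then 0 else 1 + jspec (b + pvDelta c) r

def gflags : List Char → List Bool
  | [] => [true]
  | c :: r => decide (minPref (c :: r) ≥ 0) :: gflags r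

theorem minPref_nonpos (u : List Char) : minPref u ≤ 0 := by
  cases u with
  | nil => simp [minPref]
  | cons c r => simp [minPref]

theorem goodLoop_char (u : List Char) : ∀ (s : List Char),
    goodLoop s u = decide ((s.length : Int) + minPref u ≥ 0) := by
  induction u with
  | nil => intro s; simp [goodLoop, minPref]
  | cons c r ih =>
    intro s
    have hm := minPref_nonpos r
    have hmc : minPref (c :: r) = min 0 (pvDelta c + minPref r) := rfl
    by_cases hc : c = '('
    · have h1 : goodLoop s (c :: r) = goodLoop ('(' :: s) r := by simp [goodLoop, hc]
      have hd : pvDelta c = 1 := by simp [pvDelta, hc]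
      rw [h1, ih]
      apply decide_eq_decide.mpr
      rw [hmc, hd]
      simp only [List.length_cons]
      push_cast
      omega
    · have hd : pvDelta c = -1 := by simp [pvDelta, hc]
      match s with
      | [] =>
        have h1 : goodLoop [] (c :: r) = false := by simp [goodLoop, hc]
        rw [h1]
        symm
        rw [decide_eq_false_iff_not]
        rw [hmc, hd]
        simp only [List.length_nil, Nat.cast_zero]
        omega
      | x :: s' =>
        have h1 : goodLoop (x :: s') (c :: r) = goodLoop s' r := by simp [goodLoop, hc]
        rw [h1, ih]
        apply decide_eq_decide.mpr
        rw [hmc, hd]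
        simp only [List.length_cons]
        push_cast
        omega

theorem goodA_char (u : List Char) : goodA u = decide (minPref u ≥ 0) := by
  have := goodLoop_char u []
  simpa [goodA] using this

theorem minPref_cons (c : Char) (r : List Char) :
    minPref (c :: r) = min 0 (pvDelta c + minPref r) := rfl

theorem balList_cons (b : Int) (c : Char) (r : List Char) :
    balList b (c :: r) = b :: balList (b + pvDelta c) r := rfl

theorem balList_shape (b : Int) (u : List Char) : ∃ t, balList b u = b :: t := by
  cases u with
  | nil => exact ⟨[], rfl⟩
  | cons c r => exact ⟨_, rfl⟩

theorem jspec_le (u : List Char) : ∀ (b : Int), jspec b u ≤ u.length := by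
  induction u with
  | nil => intro b; simp [jspec]
  | cons c r ih =>
    intro b
    simp only [jspec, List.length_cons]
    split
    · omega
    · have := ih (b + pvDelta c); omega

theorem gflags_drop (u : List Char) : ∀ (k : Nat), k ≤ u.length →
    (gflags u).drop k = gflags (u.drop k) := by
  induction u with
  | nil =>
    intro k hk
    have hk0 : k = 0 := by simpa using hk
    subst hk0; simp
  | cons c r ih =>
    intro k hk
    cases k with
    | zero => simp
    | succ k' =>
      have : (gflags (c :: r)).drop (k' + 1) = (gflags r).drop k' := by simp [gflags]
      rw [this, ih k' (by simpa using hk)]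
      simp

theorem changeA_aux (u : List Char) : ∀ (r : List Char),
    u.foldl (fun r c => r ++ [if c = '(' then ')' else '(']) r
      = r ++ u.map (fun c => if c = '(' then ')' else '(') := by
  induction u with
  | nil => intro r; simp
  | cons c t ih => intro r; simp [List.foldl, ih]

theorem changeA_map (u : List Char) :
    changeA u = u.map (fun c => if c = '(' then ')' else '(') := by
  simpa [changeA] using changeA_aux u []

theorem divLoop_spec (rest : List Char) : ∀ (oc cc : Int) (acc : List Char),
    acc ≠ [] → oc + cc = acc.length →
    divLoop oc cc acc rest
      = (acc.reverse ++ rest.take (jspec (oc - cc) rest),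
         rest.drop (jspec (oc - cc) rest)) := by
  induction rest with
  | nil => intro oc cc acc _ _; simp [divLoop, jspec]
  | cons c r ih =>
    intro oc cc acc hne hlen
    have hlen1 : 1 ≤ acc.length := List.length_pos_of_ne_nil hne
    by_cases h0 : oc ≠ 0 ∧ oc = cc
    · have hz : oc - cc = 0 := by omega
      have hstep : divLoop oc cc acc (c :: r) = (acc.reverse, c :: r) := by
        simp only [divLoop, if_pos h0]
      have hjz : jspec (oc - cc) (c :: r) = 0 := by simp [jspec, hz]
      rw [hstep, hjz]
      simp
    · have hocc : oc ≠ cc := by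
        rcases not_and_or.mp h0 with h | h
        · have h' : oc = 0 := not_not.mp h
          intro he
          rw [h', ← he] at hlen
          omega
        · exact h
      have hj : jspec (oc - cc) (c :: r) = 1 + jspec (oc - cc + pvDelta c) r := by
        simp only [jspec]
        rw [if_neg (by omega)]
      rw [hj]
      by_cases hc : c = '('
      · have hd : pvDelta c = 1 := by simp [pvDelta, hc]
        have hstep : divLoop oc cc acc (c :: r) = divLoop (oc + 1) cc (c :: acc) r := by
          simp [divLoop, h0, hc]
        rw [hstep, ih (oc + 1) cc (c :: acc) (by simp) (by simp; push_cast; omega)]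
        have he : oc + 1 - cc = oc - cc + pvDelta c := by rw [hd]; ring
        rw [he, Nat.add_comm 1 (jspec (oc - cc + pvDelta c) r)]
        simp [List.take_succ_cons, List.drop_succ_cons, List.reverse_cons, List.append_assoc]
      · have hd : pvDelta c = -1 := by simp [pvDelta, hc]
        have hstep : divLoop oc cc acc (c :: r) = divLoop oc (cc + 1) (c :: acc) r := by
          simp [divLoop, h0, hc]
        rw [hstep, ih oc (cc + 1) (c :: acc) (by simp) (by simp; push_cast; omega)]
        have he : oc - (cc + 1) = oc - cc + pvDelta c := by rw [hd]; ring
        rw [he, Nat.add_comm 1 (jspec (oc - cc + pvDelta c) r)]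
        simp [List.take_succ_cons, List.drop_succ_cons, List.reverse_cons, List.append_assoc]

theorem divideUV_spec (c : Char) (cs : List Char) :
    divideUV (c :: cs)
      = (c :: cs.take (jspec (pvDelta c) cs), cs.drop (jspec (pvDelta c) cs)) := by
  unfold divideUV
  have h0 : ¬ ((0 : Int) ≠ 0 ∧ (0 : Int) = 0) := by simp
  by_cases hc : c = '('
  · have hd : pvDelta c = 1 := by simp [pvDelta, hc]
    have hstep : divLoop 0 0 [] (c :: cs) = divLoop 1 0 [c] cs := by
      simp [divLoop, hc]
    rw [hstep, divLoop_spec cs 1 0 [c] (by simp) (by simp), hd]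
    norm_num
  · have hd : pvDelta c = -1 := by simp [pvDelta, hc]
    have hstep : divLoop 0 0 [] (c :: cs) = divLoop 0 1 [c] cs := by
      simp [divLoop, hc]
    rw [hstep, divLoop_spec cs 0 1 [c] (by simp) (by simp), hd]
    norm_num

theorem findChunk_spec (cs : List Char) : ∀ (bi bcur m : Int) (acc : List Char),
    findChunk bi acc (min m bcur) cs (balList bcur cs)
      = (acc.reverse ++ cs.take (jspec (bcur - bi) cs),
         cs.drop (jspec (bcur - bi) cs),
         balList (bcur + balOf (cs.take (jspec (bcur - bi) cs)))
           (cs.drop (jspec (bcur - bi) cs)),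
         min m (bcur + minPref (cs.take (jspec (bcur - bi) cs)))) := by
  induction cs with
  | nil =>
    intro bi bcur m acc
    simp [findChunk, balList, jspec, balOf, minPref]
  | cons c r ih =>
    intro bi bcur m acc
    obtain ⟨t, ht⟩ := balList_shape (bcur + pvDelta c) r
    rw [balList_cons, ht]
    by_cases h0 : bcur = bi
    · subst h0
      have hj : jspec (bcur - bcur) (c :: r) = 0 := by simp [jspec]
      rw [hj]
      simp [findChunk, balList_cons, ht, balOf, minPref]
    · have hj : jspec (bcur - bi) (c :: r) = 1 + jspec (bcur + pvDelta c - bi) r := by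
        simp only [jspec]
        rw [if_neg (by omega), show bcur - bi + pvDelta c = bcur + pvDelta c - bi by ring]
      have hstep : findChunk bi acc (min m bcur) (c :: r) (bcur :: (bcur + pvDelta c) :: t)
          = findChunk bi (c :: acc) (min (min m bcur) (bcur + pvDelta c)) r ((bcur + pvDelta c) :: t) := by
        simp [findChunk, h0]
      rw [hstep, ← ht, ih bi (bcur + pvDelta c) (min m bcur) (c :: acc), hj]
      have hmp := minPref_nonpos ((r.take (jspec (bcur + pvDelta c - bi) r)))
      rw [Nat.add_comm 1 (jspec (bcur + pvDelta c - bi) r)]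
      simp only [Prod.mk.injEq, List.take_succ_cons, List.drop_succ_cons]
      refine ⟨?_, ?_, ?_, ?_⟩
      · simp [List.reverse_cons, List.append_assoc]
      · trivial
      · congr 1
        simp [balOf]
        ring
      · rw [minPref_cons]
        omega

theorem sufScan_spec (u : List Char) : ∀ (b : Int),
    sufScan (balList b u) = (gflags u, b + minPref u) := by
  induction u with
  | nil => intro b; simp [balList, sufScan, gflags, minPref]
  | cons c r ih =>
    intro b
    obtain ⟨t, ht⟩ := balList_shape (b + pvDelta c) r
    rw [balList_cons, ht]
    have harm : sufScan (b :: (b + pvDelta c) :: t)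
        = ((decide (min b (sufScan ((b + pvDelta c) :: t)).2 ≥ b)) :: (sufScan ((b + pvDelta c) :: t)).1,
           min b (sufScan ((b + pvDelta c) :: t)).2) := rfl
    rw [harm, ← ht, ih (b + pvDelta c)]
    have hmp := minPref_nonpos r
    have hflag : decide (min b (b + pvDelta c + minPref r) ≥ b) = decide (minPref (c :: r) ≥ 0) := by
      apply decide_eq_decide.mpr
      rw [minPref_cons]
      omega
    have hsnd : min b (b + pvDelta c + minPref r) = b + minPref (c :: r) := by
      rw [minPref_cons]; omega
    simp only [gflags, hsnd]
    have hflag2 : decide (b + minPref (c :: r) ≥ b) = decide (minPref (c :: r) ≥ 0) :=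
      decide_eq_decide.mpr (by omega)
    rw [hflag2]

theorem loopB_spec (u : List Char) (b : Int) (pre post : List Char) :
    loopB pre post u (balList b u) (gflags u) = pre ++ solA u ++ post := by
  cases u with
  | nil =>
    have hA : solA [] = [] := by simp [solA, goodA, goodLoop]
    rw [loopB.eq_def]
    simp [gflags, balList, hA]
  | cons c cs =>
    by_cases hgood : minPref (c :: cs) ≥ 0
    · have hA : goodA (c :: cs) = true := by rw [goodA_char]; exact decide_eq_true hgood
      have hgf : gflags (c :: cs) = true :: gflags cs := by simp [gflags, hgood]
      rw [hgf, loopB.eq_def]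
      simp [solA, hA]
    · have hA : goodA (c :: cs) = false := by
        rw [goodA_char]; simpa using hgood
      have hgf : gflags (c :: cs) = false :: gflags cs := by simp [gflags, hgood]
      have hkle : jspec (pvDelta c) cs ≤ cs.length := jspec_le cs (pvDelta c)
      have hdiv := divideUV_spec c cs
      obtain ⟨t, ht⟩ := balList_shape (b + pvDelta c) cs
      -- reduce loopB one step: expose the bal list shape, evaluate findChunk
      have hfc : findChunk b [c] (b + pvDelta c) cs (balList (b + pvDelta c) cs)
          = (c :: cs.take (jspec (pvDelta c) cs),
             cs.drop (jspec (pvDelta c) cs),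
             balList (b + pvDelta c + balOf (cs.take (jspec (pvDelta c) cs)))
               (cs.drop (jspec (pvDelta c) cs)),
             min (b + pvDelta c) (b + pvDelta c + minPref (cs.take (jspec (pvDelta c) cs)))) := by
        have := findChunk_spec cs b (b + pvDelta c) (b + pvDelta c) [c]
        rw [min_self] at this
        rw [this, show b + pvDelta c - b = pvDelta c by ring]
        simp
      have hmp := minPref_nonpos (cs.take (jspec (pvDelta c) cs))
      have hlen1 : (c :: cs.take (jspec (pvDelta c) cs)).length - 1 = jspec (pvDelta c) cs := by
        simp [List.length_take, min_eq_left hkle]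
      have hstep : loopB pre post (c :: cs) (balList b (c :: cs)) (gflags (c :: cs))
          = (if min (b + pvDelta c) (b + pvDelta c + minPref (cs.take (jspec (pvDelta c) cs))) ≥ b
             then loopB (pre ++ (c :: cs.take (jspec (pvDelta c) cs))) post
                    (cs.drop (jspec (pvDelta c) cs))
                    (balList (b + pvDelta c + balOf (cs.take (jspec (pvDelta c) cs)))
                      (cs.drop (jspec (pvDelta c) cs)))
                    ((gflags cs).drop ((c :: cs.take (jspec (pvDelta c) cs)).length - 1))
             else loopB (pre ++ ['('])
                    (')' :: (((c :: cs.take (jspec (pvDelta c) cs)).drop 1).dropLast.map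
                       (fun c => if c = '(' then ')' else '(')) ++ post)
                    (cs.drop (jspec (pvDelta c) cs))
                    (balList (b + pvDelta c + balOf (cs.take (jspec (pvDelta c) cs)))
                      (cs.drop (jspec (pvDelta c) cs)))
                    ((gflags cs).drop ((c :: cs.take (jspec (pvDelta c) cs)).length - 1))) := by
        rw [hgf, balList_cons b c cs, ht, loopB.eq_def]
        dsimp only []
        simp only [Bool.false_eq_true, if_false]
        rw [← ht, hfc]
      rw [hstep, hlen1, gflags_drop cs _ hkle]
      have hgchunk : goodA (c :: cs.take (jspec (pvDelta c) cs))
          = decide (pvDelta c + minPref (cs.take (jspec (pvDelta c) cs)) ≥ 0) := by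
        rw [goodA_char]
        apply decide_eq_decide.mpr
        rw [minPref_cons]
        omega
      have hsA : solA (c :: cs)
          = if goodA (c :: cs.take (jspec (pvDelta c) cs))
            then (c :: cs.take (jspec (pvDelta c) cs)) ++ solA (cs.drop (jspec (pvDelta c) cs))
            else '(' :: solA (cs.drop (jspec (pvDelta c) cs)) ++ ')'
                   :: changeA (((c :: cs.take (jspec (pvDelta c) cs)).drop 1).dropLast) := by
        rw [solA]
        rw [if_neg (by simp [hA]), hdiv]
      by_cases hg2 : pvDelta c + minPref (cs.take (jspec (pvDelta c) cs)) ≥ 0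
      · rw [if_pos (by omega)]
        rw [loopB_spec (cs.drop (jspec (pvDelta c) cs)) (b + pvDelta c + balOf (cs.take (jspec (pvDelta c) cs))) _ _]
        rw [hsA, if_pos (by rw [hgchunk]; exact decide_eq_true hg2)]
        simp
      · rw [if_neg (by omega)]
        rw [loopB_spec (cs.drop (jspec (pvDelta c) cs)) (b + pvDelta c + balOf (cs.take (jspec (pvDelta c) cs))) _ _]
        rw [hsA, if_neg (by rw [hgchunk]; simpa using hg2)]
        rw [changeA_map]
        simp
termination_by u.length
decreasing_by
  all_goals
    (simp only [List.length_drop, List.length_cons]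
     omega)

theorem solution_spec : Claim_equal_solution := by
  intro p _
  unfold Spec_solution solution solution_alt
  dsimp only []
  have h1 : (sufScan (balList 0 p.toList)).1 = gflags p.toList := by
    rw [sufScan_spec p.toList 0]
  rw [h1, loopB_spec p.toList 0 [] []]
  simp
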